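-- pv_equiv track=rewrite | github.com/meliolanna/BARD | build_label_v2.py | find_id_by_name
-- ===== SOURCE A (Python) =====
-- def find_id_by_name(nodes, name: str) -> str:
--     for n in nodes:
--         if n.get("name") == name:
--             return n["id"]
--     for n in nodes:
--         if (n.get("name") or "").strip().lower() == name.lower():
--             return n["id"]
--     raise ValueError(f'Could not find node named "{name}".')
-- ===== SOURCE B (Python) =====
-- def find_id_by_name(nodes, name: str) -> str:
--     fallback = None
--     target = name.lower()
--     for n in nodes:
--         if n.get("name") == name:
--             return n["id"]
--         if fallback is None and (n.get("name") or "").strip().lower() == target: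
--             fallback = n
--     if fallback is not None:
--         return fallback["id"]
--     raise ValueError(f'Could not find node named "{name}".')
-- ===== Notes on version B (the rewrite author's own statement) =====
-- stated objective: alternative
-- what changed: Replaced A's two full passes (exact scan, then normalized scan) by a single pass that remembers the first normalized-matching node as a fallback and only dereferences it after the loop.
import Mathlib
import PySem

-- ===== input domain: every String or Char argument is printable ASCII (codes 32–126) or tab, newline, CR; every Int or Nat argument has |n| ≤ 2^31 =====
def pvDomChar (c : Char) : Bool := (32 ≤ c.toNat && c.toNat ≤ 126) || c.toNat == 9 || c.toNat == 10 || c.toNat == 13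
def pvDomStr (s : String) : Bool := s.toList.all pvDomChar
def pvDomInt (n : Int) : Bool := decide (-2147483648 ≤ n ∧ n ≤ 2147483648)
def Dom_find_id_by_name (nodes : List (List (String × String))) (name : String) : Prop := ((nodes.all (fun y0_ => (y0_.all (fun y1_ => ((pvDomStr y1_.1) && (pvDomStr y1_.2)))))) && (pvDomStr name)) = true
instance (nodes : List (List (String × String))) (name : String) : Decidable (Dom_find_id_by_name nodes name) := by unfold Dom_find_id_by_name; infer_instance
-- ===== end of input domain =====

-- B changes only the traversal: one pass with a remembered fallback node instead of A's two passes (objective: alternative decomposition, same cost).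

-- shared helper: Python dict.get on an association list (first match)
def pvGet (n : List (String × String)) (k : String) : Option String :=
  (n.find? (fun p => p.1 == k)).map (·.2)

-- (n.get("name") or "").strip().lower()
def pvNorm (n : List (String × String)) : String :=
  PySem.Str.lower (PySem.Str.strip ((pvGet n "name").getD ""))

-- ===== PORT A =====
-- first for-loop: returns some (n["id"] as Option) at the first exact match
def aLoop1 (name : String) : List (List (String × String)) → Option (Option String)
  | [] => none
  | n :: rest => if pvGet n "name" = some name then some (pvGet n "id") else aLoop1 name rest

-- second for-loop: first normalized match
def aLoop2 (name : String) : List (List (String × String)) → Option (Option String)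
  | [] => none
  | n :: rest => if pvNorm n = PySem.Str.lower name then some (pvGet n "id") else aLoop2 name rest

-- raise (ValueError / KeyError) is outside Pre_; the port returns "" there
def find_id_by_name (nodes : List (List (String × String))) (name : String) : String :=
  match aLoop1 name nodes with
  | some r => r.getD ""
  | none =>
    match aLoop2 name nodes with
    | some r => r.getD ""
    | none => ""

-- ===== PORT B =====
-- single loop; acc = first normalized-matching node seen so far (the 'fallback' variable)
def bGo (name : String) : List (List (String × String)) → Option (List (String × String)) → Option String
  | [], acc => acc.bind (fun m => pvGet m "id")
  | n :: rest, acc =>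
    if pvGet n "name" = some name then pvGet n "id"
    else bGo name rest (if acc = none ∧ pvNorm n = PySem.Str.lower name then some n else acc)

def find_id_by_name_alt (nodes : List (List (String × String))) (name : String) : String :=
  (bGo name nodes none).getD ""

-- ===== PRECONDITION & SPEC =====
-- Pre_ excludes exactly the inputs where Python A raises: no exact and no normalized match
-- (ValueError), or the winning node lacks an "id" key (KeyError).
def Pre_find_id_by_name (nodes : List (List (String × String))) (name : String) : Prop :=
  (match nodes.find? (fun n => pvGet n "name" == some name) with
   | some n => (pvGet n "id").isSome
   | none =>
     match nodes.find? (fun n => pvNorm n == PySem.Str.lower name) with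
     | some n => (pvGet n "id").isSome
     | none => false) = true
instance (nodes : List (List (String × String))) (name : String) : Decidable (Pre_find_id_by_name nodes name) := by unfold Pre_find_id_by_name; infer_instance

def pvWitness_find_id_by_name : (List (List (String × String))) × String :=
  ([[("name", "a"), ("id", "1")]], "a")

def Spec_find_id_by_name (nodes : List (List (String × String))) (name : String) (out : String) : Prop := out = find_id_by_name_alt nodes name
instance (nodes : List (List (String × String))) (name : String) (out : String) : Decidable (Spec_find_id_by_name nodes name out) := by unfold Spec_find_id_by_name; infer_instance

-- ===== CLAIM (what is proved, stated in full; the proofs are below) =====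
def Claim_equal_find_id_by_name : Prop := ∀ (nodes : List (List (String × String))) (name : String), Dom_find_id_by_name nodes name → Pre_find_id_by_name nodes name → Spec_find_id_by_name nodes name (find_id_by_name nodes name)

-- ===== LEMMAS AND PROOFS =====

-- once the fallback is set, B only waits for an exact match
theorem bGo_some (name : String) (nodes : List (List (String × String)))
    (m : List (String × String)) :
    bGo name nodes (some m) = (aLoop1 name nodes).getD (pvGet m "id") := by
  induction nodes with
  | nil => rfl
  | cons n rest ih =>
    simp only [bGo, aLoop1]
    split_ifs with h1 h2
    · rfl
    · simp at h2
    · exact ih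

-- with the fallback unset, B computes A's two loops in one pass
theorem bGo_none (name : String) (nodes : List (List (String × String))) :
    bGo name nodes none = (aLoop1 name nodes).getD ((aLoop2 name nodes).getD none) := by
  induction nodes with
  | nil => rfl
  | cons n rest ih =>
    by_cases h1 : pvGet n "name" = some name
    · simp [bGo, aLoop1, h1]
    · by_cases h2 : pvNorm n = PySem.Str.lower name
      · simp [bGo, aLoop1, aLoop2, h1, h2, bGo_some]
      · simp [bGo, aLoop1, aLoop2, h1, h2, ih]

-- the two ports agree on every input (raising inputs both fall to "")
theorem ports_eq (nodes : List (List (String × String))) (name : String) :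
    find_id_by_name nodes name = find_id_by_name_alt nodes name := by
  unfold find_id_by_name find_id_by_name_alt
  rw [bGo_none]
  cases aLoop1 name nodes <;> cases aLoop2 name nodes <;> simp

-- ===== VERDICT (by name: the statement is the Claim_ definition above) =====
theorem find_id_by_name_spec : Claim_equal_find_id_by_name := by
  intro nodes name _ _
  exact ports_eq nodes name
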